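-- pv_equiv track=rewrite | github.com/Soliton80/algorithms | python/sprint1_nonfinals/final.py | count_len
-- ===== SOURCE A (Python) =====
-- def count_len(start, numbers_list):
--     d = start
--     for n in numbers_list:
--         if n == '0':
--             d = 0
--         else:
--             d += 1
--         yield d
-- ===== SOURCE B (Python) =====
-- def count_len(start, numbers_list):
--     # Segment view: between resets the outputs are a consecutive run of integers,
--     # so find the next '0' and emit a whole range, then recurse after the reset.
--     try:
--         z = numbers_list.index('0')
--     except ValueError:
--         yield from range(start + 1, start + 1 + len(numbers_list))
--         return
--     yield from range(start + 1, start + 1 + z)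
--     yield 0
--     yield from count_len(0, numbers_list[z + 1:])
-- ===== Notes on version B (the rewrite author's own statement) =====
-- stated objective: alternative
-- what changed: B abandons the per-element reset-or-increment accumulator: it locates each '0' with list.index and emits each inter-reset segment as a whole arithmetic range, recursing on the suffix after the reset.
import Mathlib
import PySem

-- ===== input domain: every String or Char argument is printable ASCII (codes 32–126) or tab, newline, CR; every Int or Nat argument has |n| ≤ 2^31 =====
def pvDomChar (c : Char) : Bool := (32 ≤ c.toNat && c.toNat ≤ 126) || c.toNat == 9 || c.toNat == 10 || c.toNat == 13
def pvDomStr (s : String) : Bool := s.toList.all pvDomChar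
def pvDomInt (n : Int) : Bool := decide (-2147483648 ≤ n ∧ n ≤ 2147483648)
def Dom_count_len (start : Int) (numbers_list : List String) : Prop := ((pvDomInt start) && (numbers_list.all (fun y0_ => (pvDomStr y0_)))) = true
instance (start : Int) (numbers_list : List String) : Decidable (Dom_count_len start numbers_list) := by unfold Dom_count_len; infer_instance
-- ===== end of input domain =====

-- B replaces A's per-element reset-or-increment accumulator by a segment view: it finds each '0' with list.index and emits each inter-reset segment as one arithmetic range, recursing after the reset (alternative decomposition, same result).


-- ===== PORT A =====
-- port of A: the loop carrying d, yielding each value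
def count_len (start : Int) (numbers_list : List String) : List Int :=
  match numbers_list with
  | [] => []
  | n :: rest =>
    let d := if n == "0" then 0 else start + 1
    d :: count_len d rest

-- ===== PORT B =====
-- termination fact for the port: numbers_list.index('0') = z → the slice after z is shorter
theorem pv_slice_len_lt (numbers_list : List String) (z : Nat)
    (h : PySem.List.index? numbers_list "0" = some z) :
    (PySem.List.slice numbers_list (some ((z : Int) + 1)) none).length < numbers_list.length := by
  obtain ⟨hz, -, -⟩ := PySem.List.getElem_of_index?_eq_some h
  have : ((z : Int) + 1) = ((z + 1 : Nat) : Int) := by push_cast; ring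
  rw [this, PySem.List.slice_from_natCast]
  simp only [List.length_drop]
  omega

-- port of B: find the next '0' with list.index, emit the segment as a range, recurse on the slice
def count_len_alt (start : Int) (numbers_list : List String) : List Int :=
  match h : PySem.List.index? numbers_list "0" with
  | none => PySem.List.pyRange (start + 1) (start + 1 + numbers_list.length) 1
  | some z =>
      PySem.List.pyRange (start + 1) (start + 1 + z) 1 ++
        0 :: count_len_alt 0 (PySem.List.slice numbers_list (some ((z : Int) + 1)) none)
termination_by numbers_list.length
decreasing_by exact pv_slice_len_lt numbers_list z h

-- ===== PRECONDITION & SPEC =====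
def Spec_count_len (start : Int) (numbers_list : List String) (out : List Int) : Prop := out = count_len_alt start numbers_list
instance (start : Int) (numbers_list : List String) (out : List Int) : Decidable (Spec_count_len start numbers_list out) := by unfold Spec_count_len; infer_instance

-- ===== CLAIM =====
def Claim_equal_count_len : Prop := ∀ (start : Int) (numbers_list : List String), Dom_count_len start numbers_list → Spec_count_len start numbers_list (count_len start numbers_list)

-- ===== LEMMAS AND PROOFS =====

-- on a zero-free prefix, A's loop counts up: it emits a consecutive range and leaves d = a + pre.length
lemma count_len_no_zero_prefix (pre suf : List String) (hpre : "0" ∉ pre) : ∀ (a : Int),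
    count_len a (pre ++ suf) =
      PySem.List.pyRange (a + 1) (a + 1 + pre.length) 1 ++ count_len (a + pre.length) suf := by
  induction pre with
  | nil =>
    intro a
    simp
  | cons n rest ih =>
    intro a
    have hn : n ≠ "0" := fun hc => hpre (hc ▸ List.mem_cons_self)
    have hrest : "0" ∉ rest := fun hc => hpre (List.mem_cons_of_mem _ hc)
    have hlt : a + 1 < a + 1 + ((n :: rest).length : Int) := by
      simp only [List.length_cons]; push_cast; omega
    rw [List.cons_append]
    simp only [count_len, beq_iff_eq, if_neg hn]
    rw [ih hrest (a + 1), PySem.List.pyRange_one_cons hlt]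
    have h1 : a + 1 + 1 + ((rest.length : Nat) : Int) = a + 1 + ((n :: rest).length : Int) := by
      simp only [List.length_cons]; push_cast; ring
    have h2 : a + 1 + ((rest.length : Nat) : Int) = a + ((n :: rest).length : Int) := by
      simp only [List.length_cons]; push_cast; ring
    rw [h1, h2]
    simp

theorem count_len_spec : Claim_equal_count_len := by
  intro start numbers_list _
  unfold Spec_count_len
  clear ‹Dom_count_len start numbers_list›
  induction hL : numbers_list.length using Nat.strong_induction_on generalizing start numbers_list with
  | _ L ih =>
  rw [count_len_alt]
  split
  · next hnone =>
    have hmem : "0" ∉ numbers_list := (PySem.List.index?_eq_none_iff _ _).mp hnone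
    have := count_len_no_zero_prefix numbers_list [] hmem start
    simpa [count_len] using this
  · next z hsome =>
    obtain ⟨pre, suf, heq, hlen, hnot⟩ := (PySem.List.index?_eq_some_iff _ _ _).mp hsome
    have hslice : PySem.List.slice numbers_list (some ((z : Int) + 1)) none = suf := by
      have hc : ((z : Int) + 1) = ((z + 1 : Nat) : Int) := by push_cast; ring
      rw [hc, PySem.List.slice_from_natCast, heq, ← hlen]
      simp
    rw [hslice]
    have hrec : count_len 0 suf = count_len_alt 0 suf := by
      have hsl : suf.length < L := by
        subst hL; rw [heq]; simp; omega
      exact ih suf.length hsl 0 suf rfl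
    rw [heq, count_len_no_zero_prefix pre ("0" :: suf) hnot start]
    simp only [count_len, beq_self_eq_true, if_pos, hlen, hrec]
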